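-- pv_equiv track=rewrite | github.com/LunguRadu/DKSwingDataProcessing | processSwingData.py | searchMultiContinuityWithinRange
-- ===== SOURCE A (Python) =====
-- def searchMultiContinuityWithinRange(data, index_begin, index_end, threshold_lo, threshold_hi, win_length):
--     """
--     From indexBegin to indexEnd, search data for values that are higher than thresholdLo and lower than thresholdHi.
--     :param index_end
--     :param data
--     :param index_begin
--     :param threshold_lo
--     :param threshold_hi
--     :param win_length
--     Return the the starting index and ending index of all continuous samples that meet this criteria for at least
--     winLength data points.
--     """
--     start_pointer = index_begin
--     end_pointer = index_begin
--     continuity_count = 0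
--     index_list = []
--     while start_pointer < index_end and end_pointer < index_end:
--         current_value = data[end_pointer]
--         if threshold_lo < current_value < threshold_hi:
--             end_pointer += 1
--             continuity_count += 1
--         else:
--             end_pointer += 1
--             start_pointer = end_pointer
--             continuity_count = 0
--
--         if continuity_count == win_length:
--             start_end_index = (start_pointer, end_pointer)  # put the information into a tuple
--             index_list.append(start_end_index)
--
--             start_pointer += 1
--             continuity_count -= 1
--
--     return index_list
-- ===== SOURCE B (Python) =====
-- def searchMultiContinuityWithinRange(data, index_begin, index_end, threshold_lo, threshold_hi, win_length):
--     """Enumerate every candidate window start directly and test the whole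
--     window with all(); no streaming pointers or counters are maintained."""
--     return [(p, p + win_length)
--             for p in range(index_begin, index_end - win_length + 1)
--             if all(threshold_lo < data[j] < threshold_hi
--                    for j in range(p, p + win_length))]
-- ===== Notes on version B (the rewrite author's own statement) =====
-- stated objective: simpler
-- what changed: A's streaming two-pointer loop with a continuity counter is replaced by a direct comprehension over every candidate window start that tests the whole window with all().
-- outside the precondition, e.g. on searchMultiContinuityWithinRange([1], 0, 1, 0, 2, 0): A returns [], B returns [(0, 0), (1, 1)]; on searchMultiContinuityWithinRange([5], 0, 1, 0, 2, 0): A returns [(1, 1)], B returns [(0, 0), (1, 1)]; on searchMultiContinuityWithinRange([1], 0, 1, 0, 2, -1): A returns [], B returns [(0, -1), (1, 0), (2, 1)]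
import Mathlib
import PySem

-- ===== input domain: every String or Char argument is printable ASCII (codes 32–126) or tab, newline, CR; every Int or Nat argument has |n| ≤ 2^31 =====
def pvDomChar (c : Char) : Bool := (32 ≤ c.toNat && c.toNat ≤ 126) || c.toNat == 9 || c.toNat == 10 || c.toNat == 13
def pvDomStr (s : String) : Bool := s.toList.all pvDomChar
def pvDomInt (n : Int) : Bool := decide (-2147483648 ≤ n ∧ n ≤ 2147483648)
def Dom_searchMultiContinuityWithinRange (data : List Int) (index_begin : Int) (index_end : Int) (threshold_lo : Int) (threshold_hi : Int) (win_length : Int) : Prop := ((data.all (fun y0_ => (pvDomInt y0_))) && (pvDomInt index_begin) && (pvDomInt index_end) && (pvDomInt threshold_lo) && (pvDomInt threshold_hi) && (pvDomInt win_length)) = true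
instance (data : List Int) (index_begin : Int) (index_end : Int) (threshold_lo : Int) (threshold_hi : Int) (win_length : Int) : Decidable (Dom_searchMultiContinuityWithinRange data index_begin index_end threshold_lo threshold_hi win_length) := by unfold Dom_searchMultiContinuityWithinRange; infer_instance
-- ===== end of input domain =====

-- B replaces A's streaming two-pointer loop by a direct enumeration of candidate
-- window starts, each tested wholesale; objective: simpler (no speed claim).


-- ===== PORT A =====
-- 'threshold_lo < data[j] < threshold_hi'; data[j] is PySem.List.pyGetD with
-- default 0: exact under Pre_ (every accessed index is then in Python range).
def pvGood (data : List Int) (lo hi j : Int) : Bool :=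
  decide (lo < PySem.List.pyGetD data j 0 ∧ PySem.List.pyGetD data j 0 < hi)

-- A's while-loop, step for step: state (start_pointer, end_pointer,
-- continuity_count, index_list); the 'if count == win_length' test follows the
-- branch exactly as in the Python.
def pvLoopA (data : List Int) (ie lo hi win : Int) (s e c : Int)
    (acc : List (Int × Int)) : List (Int × Int) :=
  if h : s < ie ∧ e < ie then
    if pvGood data lo hi e then
      if c + 1 = win then
        pvLoopA data ie lo hi win (s + 1) (e + 1) (c + 1 - 1) (acc ++ [(s, e + 1)])
      else
        pvLoopA data ie lo hi win s (e + 1) (c + 1) acc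
    else
      if (0 : Int) = win then
        pvLoopA data ie lo hi win (e + 1 + 1) (e + 1) (0 - 1) (acc ++ [(e + 1, e + 1)])
      else
        pvLoopA data ie lo hi win (e + 1) (e + 1) 0 acc
  else acc
termination_by (ie - e).toNat
decreasing_by all_goals omega

def searchMultiContinuityWithinRange (data : List Int) (index_begin : Int) (index_end : Int) (threshold_lo : Int) (threshold_hi : Int) (win_length : Int) : List (Int × Int) :=
  pvLoopA data index_end threshold_lo threshold_hi win_length index_begin index_begin 0 []

-- ===== PORT B =====
def searchMultiContinuityWithinRange_alt (data : List Int) (index_begin : Int) (index_end : Int) (threshold_lo : Int) (threshold_hi : Int) (win_length : Int) : List (Int × Int) :=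
  (PySem.List.pyRange index_begin (index_end - win_length + 1) 1).filterMap
    (fun p =>
      if (PySem.List.pyRange p (p + win_length) 1).all
           (fun j => pvGood data threshold_lo threshold_hi j)
      then some (p, p + win_length) else none)

-- ===== PRECONDITION & SPEC =====
-- Pre_ excludes (a) win_length ≤ 0 — outside the natural domain of window
-- lengths, where A's counter logic degenerates (returns [] or stray (p,p)
-- tuples) — and (b) the inputs on which A raises IndexError (some accessed
-- index out of Python range).
def Pre_searchMultiContinuityWithinRange (data : List Int) (index_begin : Int) (index_end : Int) (threshold_lo : Int) (threshold_hi : Int) (win_length : Int) : Prop :=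
  1 ≤ win_length ∧
  (index_begin < index_end →
    (-(data.length : Int) ≤ index_begin ∧ index_end ≤ (data.length : Int)))
instance (data : List Int) (index_begin : Int) (index_end : Int) (threshold_lo : Int) (threshold_hi : Int) (win_length : Int) : Decidable (Pre_searchMultiContinuityWithinRange data index_begin index_end threshold_lo threshold_hi win_length) := by unfold Pre_searchMultiContinuityWithinRange; infer_instance

def pvWitness_searchMultiContinuityWithinRange : List Int × Int × Int × Int × Int × Int := ([1, 2, 3], 0, 3, 0, 10, 2)

def Spec_searchMultiContinuityWithinRange (data : List Int) (index_begin : Int) (index_end : Int) (threshold_lo : Int) (threshold_hi : Int) (win_length : Int) (out : List (Int × Int)) : Prop := out = searchMultiContinuityWithinRange_alt data index_begin index_end threshold_lo threshold_hi win_length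
instance (data : List Int) (index_begin : Int) (index_end : Int) (threshold_lo : Int) (threshold_hi : Int) (win_length : Int) (out : List (Int × Int)) : Decidable (Spec_searchMultiContinuityWithinRange data index_begin index_end threshold_lo threshold_hi win_length out) := by unfold Spec_searchMultiContinuityWithinRange; infer_instance

-- ===== CLAIM (what is proved, stated in full; the proofs are below) =====
def Claim_equal_searchMultiContinuityWithinRange : Prop := ∀ (data : List Int) (index_begin : Int) (index_end : Int) (threshold_lo : Int) (threshold_hi : Int) (win_length : Int), Dom_searchMultiContinuityWithinRange data index_begin index_end threshold_lo threshold_hi win_length → Pre_searchMultiContinuityWithinRange data index_begin index_end threshold_lo threshold_hi win_length → Spec_searchMultiContinuityWithinRange data index_begin index_end threshold_lo threshold_hi win_length (searchMultiContinuityWithinRange data index_begin index_end threshold_lo threshold_hi win_length)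

-- ===== LEMMAS AND PROOFS =====

-- window p is all-good
def pvAllGood (data : List Int) (lo hi win p : Int) : Bool :=
  (PySem.List.pyRange p (p + win) 1).all (fun j => pvGood data lo hi j)

-- B's windows not yet emitted when end_pointer is at e
def pvTail (data : List Int) (ib ie lo hi win e : Int) : List (Int × Int) :=
  (PySem.List.pyRange ib (ie - win + 1) 1).filterMap
    (fun p => if e < p + win ∧ pvAllGood data lo hi win p = true
              then some (p, p + win) else none)

lemma pvAllGood_iff (data : List Int) (lo hi win p : Int) :
    pvAllGood data lo hi win p = true ↔
    ∀ j, p ≤ j → j < p + win → pvGood data lo hi j = true := by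
  unfold pvAllGood
  rw [List.all_eq_true]
  constructor
  · intro h j h1 h2
    exact h j (PySem.List.mem_pyRange_one.mpr ⟨h1, by omega⟩)
  · intro h j hj
    obtain ⟨h1, h2⟩ := PySem.List.mem_pyRange_one.mp hj
    exact h j h1 (by omega)

lemma pvTail_end (data : List Int) (ib ie lo hi win e : Int) (he : ie ≤ e) :
    pvTail data ib ie lo hi win e = [] := by
  unfold pvTail
  rw [List.filterMap_eq_nil_iff]
  intro p hp
  obtain ⟨h1, h2⟩ := PySem.List.mem_pyRange_one.mp hp
  rw [if_neg]
  rintro ⟨h3, -⟩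
  omega

lemma pvTail_skip (data : List Int) (ib ie lo hi win e : Int)
    (h0 : ib ≤ e + 1 - win → pvAllGood data lo hi win (e + 1 - win) = false) :
    pvTail data ib ie lo hi win e = pvTail data ib ie lo hi win (e + 1) := by
  unfold pvTail
  apply List.filterMap_congr
  intro p hp
  obtain ⟨h1, h2⟩ := PySem.List.mem_pyRange_one.mp hp
  by_cases hpe : p + win = e + 1
  · have hp0 : p = e + 1 - win := by omega
    have := h0 (by omega)
    rw [if_neg, if_neg]
    · rintro ⟨-, hg⟩; rw [hp0] at hg; simp [this] at hg
    · rintro ⟨-, hg⟩; rw [hp0] at hg; simp [this] at hg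
  · by_cases hlt : e < p + win
    · have : e + 1 < p + win := by omega
      simp only [hlt, this, true_and]
    · have : ¬ e + 1 < p + win := by omega
      simp only [hlt, this, false_and, if_neg, not_false_eq_true]

lemma pvTail_emit (data : List Int) (ib ie lo hi win s e : Int)
    (hs : ib ≤ s) (hse : s + win = e + 1) (he : e < ie)
    (hag : pvAllGood data lo hi win s = true)
    (hbefore : ∀ p, ib ≤ p → p < s → e < p + win → pvAllGood data lo hi win p = false) :
    pvTail data ib ie lo hi win e = (s, e + 1) :: pvTail data ib ie lo hi win (e + 1) := by
  unfold pvTail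
  rw [PySem.List.pyRange_one_append ib s (ie - win + 1) hs (by omega),
      PySem.List.pyRange_one_cons (show s < ie - win + 1 by omega)]
  rw [List.filterMap_append, List.filterMap_append, List.filterMap_cons, List.filterMap_cons]
  have hnil : ∀ e', e ≤ e' → (PySem.List.pyRange ib s 1).filterMap
      (fun p => if e' < p + win ∧ pvAllGood data lo hi win p = true
                then some (p, p + win) else none) = [] := by
    intro e' he'
    rw [List.filterMap_eq_nil_iff]
    intro p hp
    obtain ⟨h1, h2⟩ := PySem.List.mem_pyRange_one.mp hp
    rw [if_neg]
    rintro ⟨hlt, hg⟩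
    rw [hbefore p h1 h2 (by omega)] at hg
    exact Bool.false_ne_true hg
  rw [hnil e le_rfl, hnil (e + 1) (by omega)]
  rw [if_pos ⟨by omega, hag⟩, if_neg (by rintro ⟨h3, -⟩; omega)]
  have hcongr : (PySem.List.pyRange (s + 1) (ie - win + 1) 1).filterMap
      (fun p => if e < p + win ∧ pvAllGood data lo hi win p = true
                then some (p, p + win) else none)
      = (PySem.List.pyRange (s + 1) (ie - win + 1) 1).filterMap
      (fun p => if e + 1 < p + win ∧ pvAllGood data lo hi win p = true
                then some (p, p + win) else none) := by
    apply List.filterMap_congr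
    intro p hp
    obtain ⟨h1, h2⟩ := PySem.List.mem_pyRange_one.mp hp
    have ha : e < p + win := by omega
    have hb : e + 1 < p + win := by omega
    simp only [ha, hb, true_and]
  rw [hcongr]
  simp [hse]

lemma pvLoopA_eq_tail (data : List Int) (ib ie lo hi win : Int) (hwin : 1 ≤ win) :
    ∀ n s e c acc, (ie - e).toNat ≤ n → c = e - s → 0 ≤ c → c ≤ win - 1 → ib ≤ s →
    (∀ j, s ≤ j → j < e → pvGood data lo hi j = true) →
    (∀ p, ib ≤ p → p < s → e < p + win → pvAllGood data lo hi win p = false) →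
    pvLoopA data ie lo hi win s e c acc = acc ++ pvTail data ib ie lo hi win e := by
  intro n
  induction n with
  | zero =>
    intro s e c acc hn hc hc0 hc1 hib hgood hleft
    have he : ie ≤ e := by omega
    rw [pvLoopA, dif_neg (by omega), pvTail_end data ib ie lo hi win e he,
        List.append_nil]
  | succ n ih =>
    intro s e c acc hn hc hc0 hc1 hib hgood hleft
    by_cases he : e < ie
    · rw [pvLoopA, dif_pos ⟨by omega, he⟩]
      by_cases hg : pvGood data lo hi e = true
      · rw [if_pos hg]
        by_cases hcw : c + 1 = win
        · rw [if_pos hcw]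
          have hag : pvAllGood data lo hi win s = true := by
            rw [pvAllGood_iff]
            intro j h1 h2
            by_cases hje : j = e
            · rw [hje]; exact hg
            · exact hgood j h1 (by omega)
          rw [ih (s + 1) (e + 1) (c + 1 - 1) (acc ++ [(s, e + 1)]) (by omega)
                (by omega) (by omega) (by omega) (by omega)
                (by intro j h1 h2
                    by_cases hje : j = e
                    · rw [hje]; exact hg
                    · exact hgood j (by omega) (by omega))
                (by intro p h1 h2 h3; exact absurd h3 (by omega))]
          · rw [pvTail_emit data ib ie lo hi win s e hib (by omega) he hag hleft]
            simp
        · rw [if_neg hcw]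
          rw [ih s (e + 1) (c + 1) acc (by omega) (by omega) (by omega) (by omega) hib
                (by intro j h1 h2
                    by_cases hje : j = e
                    · rw [hje]; exact hg
                    · exact hgood j h1 (by omega))
                (by intro p h1 h2 h3
                    exact hleft p h1 h2 (by omega))]
          rw [pvTail_skip data ib ie lo hi win e]
          intro h1
          exact hleft (e + 1 - win) h1 (by omega) (by omega)
      · rw [if_neg hg, if_neg (by omega)]
        have hbad : ∀ p, p ≤ e → e < p + win → pvAllGood data lo hi win p = false := by
          intro p h1 h2
          rw [Bool.eq_false_iff]
          intro hag
          have := (pvAllGood_iff data lo hi win p).mp hag e h1 h2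
          exact hg this
        rw [ih (e + 1) (e + 1) 0 acc (by omega) (by omega) (by omega) (by omega)
              (by omega) (by intro j h1 h2; omega)
              (by intro p h1 h2 h3; exact hbad p (by omega) (by omega))]
        rw [pvTail_skip data ib ie lo hi win e]
        intro h1
        exact hbad (e + 1 - win) (by omega) (by omega)
    · have : ie ≤ e := by omega
      rw [pvLoopA, dif_neg (by omega), pvTail_end data ib ie lo hi win e this,
          List.append_nil]

lemma alt_eq_pvTail (data : List Int) (ib ie lo hi win : Int) (hwin : 1 ≤ win) :
    searchMultiContinuityWithinRange_alt data ib ie lo hi win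
      = pvTail data ib ie lo hi win ib := by
  unfold searchMultiContinuityWithinRange_alt pvTail
  apply List.filterMap_congr
  intro p hp
  obtain ⟨h1, h2⟩ := PySem.List.mem_pyRange_one.mp hp
  have : ib < p + win := by omega
  simp only [pvAllGood, this, true_and]

-- ===== VERDICT (by name: the statement is the Claim_ definition above) =====
theorem searchMultiContinuityWithinRange_spec : Claim_equal_searchMultiContinuityWithinRange := by
  intro data ib ie lo hi win _ hpre
  obtain ⟨hwin, -⟩ := hpre
  unfold Spec_searchMultiContinuityWithinRange searchMultiContinuityWithinRange
  rw [alt_eq_pvTail data ib ie lo hi win hwin]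
  rw [pvLoopA_eq_tail data ib ie lo hi win hwin ((ie - ib).toNat) ib ib 0 []
        le_rfl (by omega) le_rfl (by omega) le_rfl
        (by intro j h1 h2; omega)
        (by intro p h1 h2 h3; omega)]
  simp
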